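-- pv_equiv track=rewrite | github.com/BenTibi55/Memory | affiche_grid.py | affiche_2case
-- ===== SOURCE A (Python) =====
-- def grid_to_string_with_size(grid, n, m):
--     # affiche la grille de la bonne taille
--     # grid est une liste de listes, n et m entiers
--     # renvoie une chaîne de caractères
--     string_grille = ""
--     string_grille += "=== "*m
--     string_grille += "\n"
--     for k in range(n):
--         for i in range(m):
--             string_grille += "|"+str(grid[k][i])+"| "
--         string_grille += "\n"
--         string_grille += "=== "*m
--         string_grille += "\n"
--     return string_grille
--
-- def affiche_2case(grid, pos1, pos2):
--     # pos1 et pos2 sont des tuples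
--     # prend en argument la grille (liste de listes) et la position de chacune des deux cases à retourner.
--     # Affiche la grille (chaîne de caractères) avec ces deux cases uniquement révélées
--     n = len(grid)
--     m = len(grid[0])
--     L = []
--     for i in range(0, n):
--         M = []
--         for j in range(0, m):
--             if (i, j) == pos1 or (i, j) == pos2:
--                 M.append(grid[i][j])
--             elif grid[i][j] == " ":
--                 M.append(" ")
--             else:
--                 M.append("X")
--         L.append(M)
--     return grid_to_string_with_size(L, n, m)
-- ===== SOURCE B (Python) =====
-- def affiche_2case(grid, pos1, pos2):
--     # Single fused pass: compute each cell's display value directly and emit the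
--     # rendered string with join, without building the intermediate masked grid.
--     n = len(grid)
--     m = len(grid[0])
--     sep = "=== " * m
--
--     def cell(i, j):
--         if (i, j) == pos1 or (i, j) == pos2:
--             return grid[i][j]
--         return " " if grid[i][j] == " " else "X"
--
--     body = "".join(
--         "".join("|" + str(cell(i, j)) + "| " for j in range(m)) + "\n" + sep + "\n"
--         for i in range(n)
--     )
--     return sep + "\n" + body
-- ===== Notes on version B (the rewrite author's own statement) =====
-- stated objective: simpler
-- what changed: B drops the intermediate masked grid L and the separate renderer: one fused nested pass computes each cell's display value and joins the formatted pieces directly.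
-- outside the precondition, e.g. on affiche_2case([], (0, 0), (1, 1)): A raises IndexError, B raises IndexError; on affiche_2case([['a', 'b'], ['c']], (0, 0), (0, 1)): A raises IndexError, B raises IndexError
import Mathlib
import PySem

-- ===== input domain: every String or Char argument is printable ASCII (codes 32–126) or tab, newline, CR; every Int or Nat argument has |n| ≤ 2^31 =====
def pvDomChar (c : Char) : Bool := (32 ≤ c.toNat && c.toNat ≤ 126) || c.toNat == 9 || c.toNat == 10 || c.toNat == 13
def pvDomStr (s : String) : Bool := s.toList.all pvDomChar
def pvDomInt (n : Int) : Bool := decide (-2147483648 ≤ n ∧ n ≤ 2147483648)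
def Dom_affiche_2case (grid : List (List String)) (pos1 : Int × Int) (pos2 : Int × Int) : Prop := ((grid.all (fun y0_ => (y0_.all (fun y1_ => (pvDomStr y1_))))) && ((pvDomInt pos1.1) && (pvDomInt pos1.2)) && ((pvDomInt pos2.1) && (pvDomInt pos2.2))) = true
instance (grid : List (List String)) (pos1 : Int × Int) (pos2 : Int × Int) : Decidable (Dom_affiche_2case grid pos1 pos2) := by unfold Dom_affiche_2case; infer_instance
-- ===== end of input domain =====

-- B fuses masking and rendering into one nested pass (no intermediate grid L); same output, same cost.
-- Both ports build the character list of the result and wrap it with String.ofList at the end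
-- (exact: Python string concatenation is concatenation of the character sequences).

-- ===== PORT A =====
-- 'str(x)' on the String cells is the identity and is ported as such.
def grid_to_string_with_size (grid : List (List String)) (n m : Int) : List Char :=
  -- string_grille = ""; += "=== "*m; += "\n"
  let s0 : List Char := [] ++ PySem.List.pyRepeat "=== ".toList m ++ "\n".toList
  (PySem.List.pyRange 0 n 1).foldl (fun s k =>
    let s := (PySem.List.pyRange 0 m 1).foldl (fun s i =>
      s ++ "|".toList ++ (PySem.List.pyGetD (PySem.List.pyGetD grid k []) i "").toList ++ "| ".toList) s
    s ++ "\n".toList ++ PySem.List.pyRepeat "=== ".toList m ++ "\n".toList) s0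

def affiche_2case (grid : List (List String)) (pos1 : Int × Int) (pos2 : Int × Int) : String :=
  let n : Int := grid.length
  let m : Int := (PySem.List.pyGetD grid 0 []).length
  let L : List (List String) :=
    (PySem.List.pyRange 0 n 1).foldl (fun L i =>
      let M : List String :=
        (PySem.List.pyRange 0 m 1).foldl (fun M j =>
          if ((i, j) = pos1 ∨ (i, j) = pos2) then
            M ++ [PySem.List.pyGetD (PySem.List.pyGetD grid i []) j ""]
          else if PySem.List.pyGetD (PySem.List.pyGetD grid i []) j "" = " " then
            M ++ [" "]
          else
            M ++ ["X"]) []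
      L ++ [M]) []
  String.ofList (grid_to_string_with_size L n m)

-- ===== PORT B =====
def pvCellB (grid : List (List String)) (pos1 pos2 : Int × Int) (i j : Nat) : String :=
  if (((i : Int), (j : Int)) = pos1 ∨ ((i : Int), (j : Int)) = pos2) then
    (grid.getD i []).getD j ""
  else if (grid.getD i []).getD j "" = " " then " " else "X"

def affiche_2case_alt (grid : List (List String)) (pos1 : Int × Int) (pos2 : Int × Int) : String :=
  let n : Nat := grid.length
  let m : Nat := (grid.getD 0 []).length
  let sep : List Char := PySem.List.pyRepeat "=== ".toList (m : Int)
  let body : List Char :=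
    ((List.range n).map (fun i =>
      ((List.range m).map (fun j =>
        "|".toList ++ (pvCellB grid pos1 pos2 i j).toList ++ "| ".toList)).flatten
      ++ "\n".toList ++ sep ++ "\n".toList)).flatten
  String.ofList (sep ++ "\n".toList ++ body)

-- ===== PRECONDITION & SPEC =====
-- Pre_ excludes exactly the inputs where Python A raises IndexError: the empty grid
-- (len(grid[0])) and ragged grids whose later rows are shorter than row 0 (grid[i][j]).
def Pre_affiche_2case (grid : List (List String)) (pos1 : Int × Int) (pos2 : Int × Int) : Prop :=
  grid ≠ [] ∧ ∀ row ∈ grid, (grid.getD 0 []).length ≤ row.length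
instance (grid : List (List String)) (pos1 : Int × Int) (pos2 : Int × Int) : Decidable (Pre_affiche_2case grid pos1 pos2) := by unfold Pre_affiche_2case; infer_instance

def pvWitness_affiche_2case : List (List String) × (Int × Int) × (Int × Int) :=
  ([["a", "b"], [" ", "d"]], (0, 1), (1, 1))

def Spec_affiche_2case (grid : List (List String)) (pos1 : Int × Int) (pos2 : Int × Int) (out : String) : Prop := out = affiche_2case_alt grid pos1 pos2
instance (grid : List (List String)) (pos1 : Int × Int) (pos2 : Int × Int) (out : String) : Decidable (Spec_affiche_2case grid pos1 pos2 out) := by unfold Spec_affiche_2case; infer_instance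

-- ===== CLAIM (what is proved, stated in full; the proofs are below) =====
def Claim_equal_affiche_2case : Prop := ∀ (grid : List (List String)) (pos1 : Int × Int) (pos2 : Int × Int), Dom_affiche_2case grid pos1 pos2 → Pre_affiche_2case grid pos1 pos2 → Spec_affiche_2case grid pos1 pos2 (affiche_2case grid pos1 pos2)

-- ===== LEMMAS AND PROOFS =====

-- A's cell value at Int indices (helper for the proof only).
def cellA (grid : List (List String)) (pos1 pos2 : Int × Int) (i j : Int) : String :=
  if ((i, j) = pos1 ∨ (i, j) = pos2) then PySem.List.pyGetD (PySem.List.pyGetD grid i []) j ""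
  else if PySem.List.pyGetD (PySem.List.pyGetD grid i []) j "" = " " then " " else "X"

theorem cellA_natCast (grid : List (List String)) (pos1 pos2 : Int × Int) (i j : Nat) :
    cellA grid pos1 pos2 (i : Int) (j : Int) = pvCellB grid pos1 pos2 i j := by
  simp [cellA, pvCellB, PySem.List.pyGetD_natCast]

-- The masked grid L built by A's nested loops, as a map over ranges.
theorem L_eq (grid : List (List String)) (pos1 pos2 : Int × Int) (n m : Nat) :
    (PySem.List.pyRange 0 (n : Int)).foldl (fun L i =>
      L ++ [(PySem.List.pyRange 0 (m : Int)).foldl (fun M j =>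
          if ((i, j) = pos1 ∨ (i, j) = pos2) then
            M ++ [PySem.List.pyGetD (PySem.List.pyGetD grid i []) j ""]
          else if PySem.List.pyGetD (PySem.List.pyGetD grid i []) j "" = " " then
            M ++ [" "]
          else
            M ++ ["X"]) []]) []
    = (List.range n).map (fun i => (List.range m).map (fun j => pvCellB grid pos1 pos2 i j)) := by
  have hinner : ∀ i : Int, (fun (M : List String) (j : Int) =>
      if ((i, j) = pos1 ∨ (i, j) = pos2) then
        M ++ [PySem.List.pyGetD (PySem.List.pyGetD grid i []) j ""]
      else if PySem.List.pyGetD (PySem.List.pyGetD grid i []) j "" = " " then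
        M ++ [" "]
      else
        M ++ ["X"])
      = fun M j => M ++ [cellA grid pos1 pos2 i j] := by
    intro i; funext M j; simp only [cellA]; split_ifs <;> rfl
  simp only [hinner]
  rw [PySem.List.pyRange_zero_nat n, List.foldl_map]
  rw [PySem.List.foldl_append_singleton_eq_map
        (f := fun i : Nat => (PySem.List.pyRange 0 (m : Int)).foldl
          (fun M j => M ++ [cellA grid pos1 pos2 (i : Int) j]) [])]
  simp only [List.nil_append]
  refine List.map_congr_left (fun i _ => ?_)
  rw [PySem.List.pyRange_zero_nat m, List.foldl_map]
  rw [PySem.List.foldl_append_singleton_eq_map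
        (f := fun j : Nat => cellA grid pos1 pos2 (i : Int) (j : Int))]
  simp [cellA_natCast]

-- Rendering a rectangular grid (every row of length m) is the fused join.
theorem render_eq (L : List (List String)) (n m : Nat)
    (hn : L.length = n) (hrow : ∀ row ∈ L, row.length = m) :
    grid_to_string_with_size L (n : Int) (m : Int)
    = PySem.List.pyRepeat "=== ".toList (m : Int) ++ "\n".toList
      ++ (L.map (fun row =>
            (row.map (fun x => "|".toList ++ x.toList ++ "| ".toList)).flatten
            ++ "\n".toList ++ PySem.List.pyRepeat "=== ".toList (m : Int) ++ "\n".toList)).flatten := by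
  subst hn
  simp only [grid_to_string_with_size, List.nil_append]
  rw [PySem.List.foldl_pyRange_zero_pyGetD' L []
        (f := fun s row => (PySem.List.pyRange 0 (m : Int)).foldl
            (fun s i => s ++ "|".toList ++ (PySem.List.pyGetD row i "").toList ++ "| ".toList) s
          ++ "\n".toList ++ PySem.List.pyRepeat "=== ".toList (m : Int) ++ "\n".toList)]
  rw [PySem.List.foldl_congr_mem _ _
        (fun s row => s ++
          ((row.map (fun x => "|".toList ++ x.toList ++ "| ".toList)).flatten
            ++ "\n".toList ++ PySem.List.pyRepeat "=== ".toList (m : Int) ++ "\n".toList)) _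
        (by
          intro s row hr
          have hm : ((row.length : Int)) = (m : Int) := by exact_mod_cast hrow row hr
          rw [← hm]
          rw [PySem.List.foldl_pyRange_zero_pyGetD' row ""
                (f := fun s x => s ++ "|".toList ++ x.toList ++ "| ".toList)]
          have hfn : (fun (s : List Char) (x : String) => s ++ "|".toList ++ x.toList ++ "| ".toList)
              = fun s x => s ++ ("|".toList ++ x.toList ++ "| ".toList) := by
            funext s x; simp
          rw [hfn, PySem.List.foldl_append_eq_flatMap]
          simp [List.flatMap_def])]
  rw [PySem.List.foldl_append_eq_flatMap]
  simp [List.flatMap_def]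

-- ===== VERDICT (by name: the statement is the Claim_ definition above) =====
theorem affiche_2case_spec : Claim_equal_affiche_2case := by
  intro grid pos1 pos2 _ _
  unfold Spec_affiche_2case affiche_2case affiche_2case_alt
  simp only [PySem.List.pyGetD_zero]
  rw [L_eq]
  rw [render_eq _ grid.length (grid.getD 0 []).length (by simp)
        (by intro row hr; simp at hr; obtain ⟨i, _, rfl⟩ := hr; simp)]
  simp [Function.comp_def, List.map_map]
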